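-- pv_equiv track=rewrite | github.com/5l1v3r1/AdvancedWebFuzzer | Encode/Encode.py | EnkodeHexTwo
-- ===== SOURCE A (Python) =====
-- import binascii
--
-- def __HexEncode(text):
--     text = bytes(text, 'utf-8')
--     hexcode = binascii.hexlify(text)
--     return str(hexcode)
--
-- def EnkodeHexTwo(text):  # with parametr &#x
--     text = __HexEncode(text)
--     text = text[2:-1]
--     out = '&#x'
--     i = -1
--     for t in text:
--         if i % 2 == 0:
--             out = out + t + "&#x"
--             i += 1
--         else:
--             out = out + t
--             i += 1
--
--     return out[0:len(out) - 3]
-- ===== SOURCE B (Python) =====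
-- def EnkodeHexTwo(text):  # with parametr &#x
--     return ''.join('&#x%02x' % b for b in bytes(text, 'utf-8'))
-- ===== Notes on version B (the rewrite author's own statement) =====
-- stated objective: faster
-- what changed: Replaces the hexlify-then-str-slice pipeline and the quadratic parity-toggle string-concatenation loop with a single pass over the raw UTF-8 bytes, formatting each byte as one ampersand-hash-x token plus two hex digits and joining once.
import Mathlib
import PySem

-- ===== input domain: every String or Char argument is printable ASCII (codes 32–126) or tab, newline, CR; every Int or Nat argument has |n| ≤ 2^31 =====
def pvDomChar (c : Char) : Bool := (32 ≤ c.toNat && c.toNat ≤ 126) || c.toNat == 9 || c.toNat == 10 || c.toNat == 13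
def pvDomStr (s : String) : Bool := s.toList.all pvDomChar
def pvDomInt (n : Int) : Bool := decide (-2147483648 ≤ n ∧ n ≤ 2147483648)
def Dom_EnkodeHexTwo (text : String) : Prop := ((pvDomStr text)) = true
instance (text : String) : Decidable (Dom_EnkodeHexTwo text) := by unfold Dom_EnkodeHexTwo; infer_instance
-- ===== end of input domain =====

-- B replaces A's hexlify→str()→slice→parity-toggle concatenation loop by one direct
-- join over the UTF-8 bytes (objective: faster; a timing run measured it).

-- lowercase hex digits, as produced both by binascii.hexlify and by '%02x'
def pvHexDigit (n : Nat) : Char := if n < 10 then Char.ofNat (48 + n) else Char.ofNat (87 + n)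
-- the two lowercase hex digits of one byte; on the ASCII domain the UTF-8 bytes of
-- `text` are exactly its code points, so this is exact there
def pvHexPair (c : Char) : List Char := [pvHexDigit (c.toNat / 16), pvHexDigit (c.toNat % 16)]

-- ===== PORT A =====
-- str(binascii.hexlify(bytes(text,'utf-8'))) = "b'" ++ hex digits ++ "'"
def pvHexEncode (text : String) : List Char :=
  ['b', '\''] ++ text.toList.flatMap pvHexPair ++ ['\'']

-- the body of A's for-loop: parity toggle on i, appending '&#x' after every second char
def pvStep (st : List Char × Int) (c : Char) : List Char × Int :=
  if PySem.Int.mod st.2 2 = 0 then (st.1 ++ [c] ++ ['&', '#', 'x'], st.2 + 1)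
  else (st.1 ++ [c], st.2 + 1)

def EnkodeHexTwo (text : String) : String :=
  let t := PySem.List.slice (pvHexEncode text) (some 2) (some (-1))   -- text[2:-1]
  let st := t.foldl pvStep (['&', '#', 'x'], -1)
  String.ofList (PySem.List.slice st.1 (some 0) (some ((st.1.length : Int) - 3)))  -- out[0:len(out)-3]

-- ===== PORT B =====
def EnkodeHexTwo_alt (text : String) : String :=
  String.ofList (text.toList.flatMap (fun c => ['&', '#', 'x'] ++ pvHexPair c))

-- ===== PRECONDITION & SPEC =====
def Spec_EnkodeHexTwo (text : String) (out : String) : Prop := out = EnkodeHexTwo_alt text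
instance (text : String) (out : String) : Decidable (Spec_EnkodeHexTwo text out) := by unfold Spec_EnkodeHexTwo; infer_instance

-- ===== CLAIM (what is proved, stated in full; the proofs are below) =====
def Claim_equal_EnkodeHexTwo : Prop := ∀ (text : String), Dom_EnkodeHexTwo text → Spec_EnkodeHexTwo text (EnkodeHexTwo text)

-- ===== LEMMAS AND PROOFS =====

-- stripping the "b'" / "'" wrapper gives back the hex digits
theorem pv_slice_wrapper (hx : List Char) :
    PySem.List.slice (['b', '\''] ++ hx ++ ['\'']) (some 2) (some (-1)) = hx := by
  have h3 : (['b', '\''] ++ hx ++ ['\'']).length = hx.length + 3 := by simp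
  simp only [PySem.List.slice, PySem.List.clampIdx_neg_one, h3]
  have h2 : PySem.List.clampIdx (hx.length + 3) (2 : Int) = 2 := by
    rw [show (2 : Int) = ((2 : Nat) : Int) by norm_num, PySem.List.clampIdx_natCast]
    omega
  rw [h2]
  have hd : (['b', '\''] ++ hx ++ ['\'']).drop 2 = hx ++ ['\''] := by simp
  rw [hd, show hx.length + 3 - 1 - 2 = hx.length by omega, List.take_left']
  simp

-- the parity-toggle loop over the hex pairs: starting at an odd counter, each pair
-- of digits appends itself followed by '&#x'
theorem pv_fold_pairs (l : List Char) (out : List Char) (i : Int)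
    (h : PySem.Int.mod i 2 = 1) :
    (l.flatMap pvHexPair).foldl pvStep (out, i)
      = (out ++ l.flatMap (fun c => pvHexPair c ++ ['&', '#', 'x']), i + 2 * l.length) := by
  induction l generalizing out i with
  | nil => simp
  | cons c l ih =>
    have h0 : PySem.Int.mod (i + 1) 2 = 0 := by
      simp [PySem.Int.mod, Int.fmod_eq_emod] at *; omega
    have h1 : PySem.Int.mod (i + 2) 2 = 1 := by
      simp [PySem.Int.mod, Int.fmod_eq_emod] at *; omega
    simp only [List.flatMap_cons, pvHexPair, List.cons_append, List.nil_append, List.foldl_cons]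
    have s1 : pvStep (out, i) (pvHexDigit (c.toNat / 16))
        = (out ++ [pvHexDigit (c.toNat / 16)], i + 1) := by
      simp only [pvStep]; rw [if_neg (by rw [h]; norm_num)]
    have s2 : pvStep (out ++ [pvHexDigit (c.toNat / 16)], i + 1) (pvHexDigit (c.toNat % 16))
        = (out ++ [pvHexDigit (c.toNat / 16), pvHexDigit (c.toNat % 16), '&', '#', 'x'], i + 2) := by
      simp only [pvStep]; rw [if_pos h0]
      refine Prod.ext ?_ ?_
      · simp
      · ring
    rw [s1, s2, ih _ _ h1]
    refine Prod.ext ?_ ?_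
    · simp [pvHexPair]
    · push_cast [List.length_cons]; ring

-- rotating the separator from after each pair to before it
theorem pv_rotate (l : List Char) :
    ['&', '#', 'x'] ++ l.flatMap (fun c => pvHexPair c ++ ['&', '#', 'x'])
      = l.flatMap (fun c => ['&', '#', 'x'] ++ pvHexPair c) ++ ['&', '#', 'x'] := by
  induction l with
  | nil => simp
  | cons c l ih => simp only [List.flatMap_cons, List.append_assoc] at *; simp [ih]

-- ===== VERDICT (by name: the statement is the Claim_ definition above) =====
theorem EnkodeHexTwo_spec : Claim_equal_EnkodeHexTwo := by
  intro text _
  show EnkodeHexTwo text = EnkodeHexTwo_alt text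
  unfold EnkodeHexTwo EnkodeHexTwo_alt pvHexEncode
  dsimp only
  rw [pv_slice_wrapper, pv_fold_pairs _ _ _ (by decide)]
  set B := text.toList.flatMap (fun c => ['&', '#', 'x'] ++ pvHexPair c) with hB
  have hrot := pv_rotate text.toList
  have hlen : (['&', '#', 'x'] ++
      text.toList.flatMap (fun c => pvHexPair c ++ ['&', '#', 'x'])).length
      = B.length + 3 := by
    rw [hrot, ← hB]; simp
  rw [hlen, hrot, ← hB]
  rw [show ((B.length + 3 : Nat) : Int) - 3 = ((B.length : Nat) : Int) by push_cast; ring]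
  rw [PySem.List.slice_zero_start, PySem.List.slice_to _ (by positivity)]
  simp [List.take_left']
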